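-- pv_equiv track=rewrite | github.com/danielarico/code_challenges | site_1/173/173.py | find_is_chord
-- ===== SOURCE A (Python) =====
-- from typing import List, Dict, Tuple
--
-- TOTAL_NOTES = 12
--
-- def compute_step(root: int, step: int) -> int:
--     """Computes note at a given distance from the root"""
--     if root + step > TOTAL_NOTES - 1:
--         return step - (TOTAL_NOTES - root)
--     return root + step
--
-- def find_steps(root: int) -> List[int]:
--     """Find third and fifth notes for a given root"""
--     three_steps = compute_step(root, 3)
--     four_steps = compute_step(root, 4)
--     seven_steps = compute_step(root, 7)
--     return [three_steps, four_steps, seven_steps]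
--
-- def check_steps_existence(chord_notes: List[int], root: int,
--                           norm: List[int]) -> Tuple[bool, int, str]:
--     """Check if computed third and fifth for root exists in the testcase"""
--     # Check if fifth is in the array
--     if chord_notes[2] in norm:
--         # Check if third is in the array
--         if chord_notes[0] in norm:
--             return (True, root, "minor")
--         if chord_notes[1] in norm:
--             return (True, root, "major")
--         return (False, root, "other")
--     return (False, root, "other")
--
-- def find_is_chord(normalized: List[int], i: int) -> Tuple[bool, int, str]:
--     """Find if given normalized notes are a chord"""
--     if i == len(normalized):
--         return (False, 0, "other")
--
--     possible_root = normalized[i]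
--     # chord_notes receives [three_steps, four_steps, seven_steps]
--     chord_notes = find_steps(possible_root)
--     is_chord = check_steps_existence(chord_notes, possible_root, normalized)
--
--     if is_chord[0]:
--         return is_chord
--     return find_is_chord(normalized, i + 1)
-- ===== SOURCE B (Python) =====
-- from typing import List, Tuple
--
-- def find_is_chord(normalized: List[int], i: int) -> Tuple[bool, int, str]:
--     """Find if given normalized notes are a chord (iterative, inlined steps)."""
--     notes = set(normalized)
--     for idx in range(i, len(normalized)):
--         root = normalized[idx]
--         fifth = root + 7 - 12 if root + 7 > 11 else root + 7
--         if fifth in notes: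
--             third = root + 3 - 12 if root + 3 > 11 else root + 3
--             if third in notes:
--                 return (True, root, "minor")
--             fourth = root + 4 - 12 if root + 4 > 11 else root + 4
--             if fourth in notes:
--                 return (True, root, "major")
--     return (False, 0, "other")
-- ===== Notes on version B (the rewrite author's own statement) =====
-- stated objective: faster
-- what changed: Replaced the three helper functions and tail recursion by a single iterative loop over the remaining indices with the step arithmetic inlined and a set of the notes built once, so each chord-membership test is O(1) instead of an O(n) list scan.
import Mathlib
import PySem

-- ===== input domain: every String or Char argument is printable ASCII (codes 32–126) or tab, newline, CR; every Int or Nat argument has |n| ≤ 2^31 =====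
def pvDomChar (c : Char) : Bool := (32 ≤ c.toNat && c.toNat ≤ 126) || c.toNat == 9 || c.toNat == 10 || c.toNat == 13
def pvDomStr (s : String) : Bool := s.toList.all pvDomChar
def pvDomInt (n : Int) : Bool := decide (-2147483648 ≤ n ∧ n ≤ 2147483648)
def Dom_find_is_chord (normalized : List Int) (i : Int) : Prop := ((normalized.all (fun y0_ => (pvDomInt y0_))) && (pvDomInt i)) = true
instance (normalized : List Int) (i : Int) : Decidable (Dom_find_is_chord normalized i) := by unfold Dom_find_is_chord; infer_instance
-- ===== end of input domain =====

-- B replaces A's three-helper recursion by a single iterative loop over the remaining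
-- indices with the step arithmetic inlined and a membership set built once, making each
-- membership test O(1) instead of an O(n) list scan (objective: faster).

-- ===== PORT A =====
def compute_step (root : Int) (step : Int) : Int :=
  if root + step > 12 - 1 then step - (12 - root) else root + step

def find_steps (root : Int) : List Int :=
  [compute_step root 3, compute_step root 4, compute_step root 7]

def check_steps_existence (chord_notes : List Int) (root : Int) (norm : List Int) :
    Bool × Int × String :=
  -- chord_notes[2]/[0]/[1]: indices always in range for the 3-element list find_steps builds,
  -- so the `.getD 0` default is never taken and the port is exact.
  if norm.contains ((PySem.List.pyGet? chord_notes 2).getD 0) then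
    if norm.contains ((PySem.List.pyGet? chord_notes 0).getD 0) then (true, root, "minor")
    else if norm.contains ((PySem.List.pyGet? chord_notes 1).getD 0) then (true, root, "major")
    else (false, root, "other")
  else (false, root, "other")

def find_is_chord (normalized : List Int) (i : Int) : Bool × Int × String :=
  if i = normalized.length then (false, 0, "other")
  else
    match h : PySem.List.pyGet? normalized i with
    | none => (false, 0, "other")  -- Python raises IndexError here; excluded by Pre_
    | some possible_root =>
      let chord_notes := find_steps possible_root
      let is_chord := check_steps_existence chord_notes possible_root normalized
      if is_chord.1 then is_chord
      else find_is_chord normalized (i + 1)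
termination_by (normalized.length + 1 - i).toNat
decreasing_by
  have hlt : i < (normalized.length : Int) := by
    by_contra hc
    have hn : PySem.List.pyGet? normalized i = none := by
      rw [PySem.List.pyGet?_eq_none_iff]; simp [PySem.Raise.InRange]; omega
    simp [hn] at h
  omega

-- ===== PORT B =====
def alt_loop (normalized : List Int) (notes : PySem.Set Int) :
    List Int → Bool × Int × String
  | [] => (false, 0, "other")
  | idx :: rest =>
    match PySem.List.pyGet? normalized idx with
    | none => (false, 0, "other")  -- Python raises IndexError here; excluded by Pre_
    | some root =>
      let fifth := if root + 7 > 11 then root + 7 - 12 else root + 7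
      if notes.contains fifth then
        let third := if root + 3 > 11 then root + 3 - 12 else root + 3
        if notes.contains third then (true, root, "minor")
        else
          let fourth := if root + 4 > 11 then root + 4 - 12 else root + 4
          if notes.contains fourth then (true, root, "major")
          else alt_loop normalized notes rest
      else alt_loop normalized notes rest

def find_is_chord_alt (normalized : List Int) (i : Int) : Bool × Int × String :=
  alt_loop normalized (PySem.Set.ofList normalized)
    (PySem.List.pyRange i (normalized.length : Int) 1)

-- ===== PRECONDITION & SPEC =====
-- Pre_ excludes exactly the indices i on which Python A raises IndexError (i > len or i < -len).
def Pre_find_is_chord (normalized : List Int) (i : Int) : Prop :=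
  -(normalized.length : Int) ≤ i ∧ i ≤ (normalized.length : Int)
instance (normalized : List Int) (i : Int) : Decidable (Pre_find_is_chord normalized i) := by
  unfold Pre_find_is_chord; infer_instance

def pvWitness_find_is_chord : List Int × Int := ([0, 4, 7], 0)

def Spec_find_is_chord (normalized : List Int) (i : Int) (out : Bool × Int × String) : Prop := out = find_is_chord_alt normalized i
instance (normalized : List Int) (i : Int) (out : Bool × Int × String) : Decidable (Spec_find_is_chord normalized i out) := by unfold Spec_find_is_chord; infer_instance

-- ===== CLAIM (what is proved, stated in full; the proofs are below) =====
def Claim_equal_find_is_chord : Prop := ∀ (normalized : List Int) (i : Int), Dom_find_is_chord normalized i → Pre_find_is_chord normalized i → Spec_find_is_chord normalized i (find_is_chord normalized i)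

-- ===== LEMMAS AND PROOFS =====

-- A's compute_step equals B's inlined arithmetic.
lemma compute_step_eq (root step : Int) :
    compute_step root step = if root + step > 11 then root + step - 12 else root + step := by
  unfold compute_step
  split_ifs with h h' h' <;> omega

lemma set_contains_ofList (xs : List Int) (x : Int) :
    (PySem.Set.ofList xs).contains x = xs.contains x := by
  simp [pysem]

-- A's check on find_steps root equals B's inlined branch structure.
lemma check_eq (root : Int) (norm : List Int) :
    check_steps_existence (find_steps root) root norm =
      if norm.contains (if root + 7 > 11 then root + 7 - 12 else root + 7) then
        if norm.contains (if root + 3 > 11 then root + 3 - 12 else root + 3) then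
          (true, root, "minor")
        else if norm.contains (if root + 4 > 11 then root + 4 - 12 else root + 4) then
          (true, root, "major")
        else (false, root, "other")
      else (false, root, "other") := by
  unfold check_steps_existence find_steps
  simp [PySem.List.pyGet?, PySem.List.pyIdx?, compute_step_eq]

lemma main_lemma (normalized : List Int) (i : Int)
    (h1 : -(normalized.length : Int) ≤ i) (h2 : i ≤ (normalized.length : Int)) :
    find_is_chord normalized i =
      alt_loop normalized (PySem.Set.ofList normalized)
        (PySem.List.pyRange i (normalized.length : Int) 1) := by
  by_cases he : i = (normalized.length : Int)
  · subst he
    rw [find_is_chord, PySem.List.pyRange_one]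
    simp [alt_loop]
  · have hlt : i < (normalized.length : Int) := lt_of_le_of_ne h2 he
    have hget : ∃ r, PySem.List.pyGet? normalized i = some r := by
      cases hg : PySem.List.pyGet? normalized i with
      | none =>
        rw [PySem.List.pyGet?_eq_none_iff] at hg
        exact absurd (by simp [PySem.Raise.InRange]; omega) hg
      | some r => exact ⟨r, rfl⟩
    obtain ⟨root, hroot⟩ := hget
    have ih := main_lemma normalized (i + 1) (by omega) (by omega)
    rw [find_is_chord, PySem.List.pyRange_one_cons hlt]
    simp only [if_neg he]
    conv_rhs => rw [alt_loop]
    rw [hroot]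
    simp only [check_eq, set_contains_ofList]
    by_cases c7 : (if root + 7 > 11 then root + 7 - 12 else root + 7) ∈ normalized
    · by_cases c3 : (if root + 3 > 11 then root + 3 - 12 else root + 3) ∈ normalized
      · simp [c7, c3]
      · by_cases c4 : (if root + 4 > 11 then root + 4 - 12 else root + 4) ∈ normalized
        · simp [c7, c3, c4]
        · simp [c7, c3, c4, ih]
    · simp [c7, ih]
termination_by (normalized.length + 1 - i).toNat
decreasing_by omega

-- ===== VERDICT (by name: the statement is the Claim_ definition above) =====
theorem find_is_chord_spec : Claim_equal_find_is_chord := by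
  intro normalized i _ hpre
  unfold Spec_find_is_chord find_is_chord_alt
  exact main_lemma normalized i hpre.1 hpre.2
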